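-- pv_equiv track=rewrite | github.com/ttoino/advent-of-code | 2016/day02.py | part2
-- ===== SOURCE A (Python) =====
-- def part2(inp: list[str]) -> str:
--     btns = {
--         (0, -2): "1",
--         (-1, -1): "2",
--         (0, -1): "3",
--         (1, -1): "4",
--         (-2, 0): "5",
--         (-1, 0): "6",
--         (0, 0): "7",
--         (1, 0): "8",
--         (2, 0): "9",
--         (-1, 1): "A",
--         (0, 1): "B",
--         (1, 1): "C",
--         (0, 2): "D",
--     }
--     btn = (-2, 0)
--     result = ""
--
--     for line in inp:
--         for d in line:
--             match d:
--                 case "U":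
--                     if btn[1] - abs(btn[0]) != -2:
--                         btn = btn[0], btn[1] - 1
--                 case "R":
--                     if btn[0] + abs(btn[1]) != 2:
--                         btn = btn[0] + 1, btn[1]
--                 case "D":
--                     if btn[1] + abs(btn[0]) != 2:
--                         btn = btn[0], btn[1] + 1
--                 case "L":
--                     if btn[0] - abs(btn[1]) != -2:
--                         btn = btn[0] - 1, btn[1]
--
--         result += btns[btn]
--
--     return result
-- ===== SOURCE B (Python) =====
-- def part2(inp: list[str]) -> str:
--     # Precomputed state machine: current button label -> {direction: next button}.
--     # A missing direction means the move would leave the keypad, so the cursor stays.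
--     trans = {
--         "1": {"D": "3"},
--         "2": {"R": "3", "D": "6"},
--         "3": {"U": "1", "L": "2", "R": "4", "D": "7"},
--         "4": {"L": "3", "D": "8"},
--         "5": {"R": "6"},
--         "6": {"U": "2", "L": "5", "R": "7", "D": "A"},
--         "7": {"U": "3", "L": "6", "R": "8", "D": "B"},
--         "8": {"U": "4", "L": "7", "R": "9", "D": "C"},
--         "9": {"L": "8"},
--         "A": {"U": "6", "R": "B"},
--         "B": {"U": "7", "L": "A", "R": "C", "D": "D"},
--         "C": {"U": "8", "L": "B"},
--         "D": {"U": "B"},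
--     }
--     btn = "5"
--     out = []
--     for line in inp:
--         for d in line:
--             btn = trans[btn].get(d, btn)
--         out.append(btn)
--     return "".join(out)
-- ===== Notes on version B (the rewrite author's own statement) =====
-- stated objective: alternative
-- what changed: Replaces A's coordinate simulation (x,y cursor, four arithmetic boundary guards, coordinate->label dict at each line end) by a precomputed finite-state machine over button labels: the state is the button character itself and each move is a single transition-table lookup with stay-put default, with the code joined from a list at the end.
import Mathlib
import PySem

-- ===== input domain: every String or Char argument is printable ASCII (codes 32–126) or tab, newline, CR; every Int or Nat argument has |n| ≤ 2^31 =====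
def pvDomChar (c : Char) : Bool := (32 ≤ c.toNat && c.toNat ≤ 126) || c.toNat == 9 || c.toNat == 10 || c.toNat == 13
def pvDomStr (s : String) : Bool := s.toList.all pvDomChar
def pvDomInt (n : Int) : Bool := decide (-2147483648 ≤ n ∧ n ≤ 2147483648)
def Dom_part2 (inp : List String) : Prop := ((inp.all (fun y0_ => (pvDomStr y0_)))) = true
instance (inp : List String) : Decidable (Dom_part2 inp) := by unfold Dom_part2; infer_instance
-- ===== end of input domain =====

-- B replaces A's coordinate geometry (x,y cursor, arithmetic boundary guards, coordinate→label
-- dict) by a precomputed finite state machine over button labels: one transition-table lookup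
-- per move character, no coordinates at run time (simpler/alternative).

-- ===== PORT A =====
-- the keypad dict of A
def pvBtns : PySem.Dict (Int × Int) String :=
  PySem.Dict.ofList
    [((0, -2), "1"), ((-1, -1), "2"), ((0, -1), "3"), ((1, -1), "4"),
     ((-2, 0), "5"), ((-1, 0), "6"), ((0, 0), "7"), ((1, 0), "8"), ((2, 0), "9"),
     ((-1, 1), "A"), ((0, 1), "B"), ((1, 1), "C"), ((0, 2), "D")]

-- A's inner match on one move character (arithmetic boundary guards)
def pvStepA (btn : Int × Int) (d : Char) : Int × Int :=
  if d = 'U' then (if btn.2 - |btn.1| ≠ -2 then (btn.1, btn.2 - 1) else btn)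
  else if d = 'R' then (if btn.1 + |btn.2| ≠ 2 then (btn.1 + 1, btn.2) else btn)
  else if d = 'D' then (if btn.2 + |btn.1| ≠ 2 then (btn.1, btn.2 + 1) else btn)
  else if d = 'L' then (if btn.1 - |btn.2| ≠ -2 then (btn.1 - 1, btn.2) else btn)
  else btn

def part2 (inp : List String) : String :=
  (inp.foldl
    (fun (st : (Int × Int) × String) line =>
      let btn := line.toList.foldl pvStepA st.1
      (btn, st.2 ++ pvBtns.getD btn ""))
    ((-2, 0), "")).2

-- ===== PORT B =====
-- B's precomputed transition table: button label → (direction → next button label)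
def pvTrans : PySem.Dict String (PySem.Dict Char String) :=
  PySem.Dict.ofList
    [("1", PySem.Dict.ofList [('D', "3")]),
     ("2", PySem.Dict.ofList [('R', "3"), ('D', "6")]),
     ("3", PySem.Dict.ofList [('U', "1"), ('L', "2"), ('R', "4"), ('D', "7")]),
     ("4", PySem.Dict.ofList [('L', "3"), ('D', "8")]),
     ("5", PySem.Dict.ofList [('R', "6")]),
     ("6", PySem.Dict.ofList [('U', "2"), ('L', "5"), ('R', "7"), ('D', "A")]),
     ("7", PySem.Dict.ofList [('U', "3"), ('L', "6"), ('R', "8"), ('D', "B")]),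
     ("8", PySem.Dict.ofList [('U', "4"), ('L', "7"), ('R', "9"), ('D', "C")]),
     ("9", PySem.Dict.ofList [('L', "8")]),
     ("A", PySem.Dict.ofList [('U', "6"), ('R', "B")]),
     ("B", PySem.Dict.ofList [('U', "7"), ('L', "A"), ('R', "C"), ('D', "D")]),
     ("C", PySem.Dict.ofList [('U', "8"), ('L', "B")]),
     ("D", PySem.Dict.ofList [('U', "B")])]

-- Source B's `trans[btn].get(d, btn)`; btn is always a table key (the `none` arm is unreachable)
def pvStepB (btn : String) (d : Char) : String :=
  match pvTrans.get? btn with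
  | some m => m.getD d btn
  | none => btn

def part2_alt (inp : List String) : String :=
  String.join
    ((inp.foldl
      (fun (st : String × List String) line =>
        let btn := line.toList.foldl pvStepB st.1
        (btn, st.2 ++ [btn]))
      ("5", [])).2)

-- ===== PRECONDITION & SPEC =====
def Spec_part2 (inp : List String) (out : String) : Prop := out = part2_alt inp
instance (inp : List String) (out : String) : Decidable (Spec_part2 inp out) := by unfold Spec_part2; infer_instance

-- ===== CLAIM (what is proved, stated in full; the proofs are below) =====
def Claim_equal_part2 : Prop := ∀ (inp : List String), Dom_part2 inp → Spec_part2 inp (part2 inp)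

-- ===== LEMMAS AND PROOFS =====

-- the 13 keypad positions (the invariant set of A's cursor)
def pvKeys : List (Int × Int) :=
  [(0, -2), (-1, -1), (0, -1), (1, -1), (-2, 0), (-1, 0), (0, 0), (1, 0), (2, 0),
   (-1, 1), (0, 1), (1, 1), (0, 2)]

-- A's coordinate labelled by the keypad dict
def pvLbl (p : Int × Int) : String := pvBtns.getD p ""

-- the two outer folds, named so the induction lemmas match syntactically
def pvFoldA (inp : List String) (st : (Int × Int) × String) : (Int × Int) × String :=
  inp.foldl
    (fun st line =>
      let btn := line.toList.foldl pvStepA st.1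
      (btn, st.2 ++ pvBtns.getD btn "")) st

def pvFoldB (inp : List String) (st : String × List String) : String × List String :=
  inp.foldl
    (fun st line =>
      let btn := line.toList.foldl pvStepB st.1
      (btn, st.2 ++ [btn])) st

theorem part2_as_fold (inp : List String) : part2 inp = (pvFoldA inp ((-2, 0), "")).2 := rfl
theorem part2_alt_as_fold (inp : List String) :
    part2_alt inp = String.join (pvFoldB inp ("5", [])).2 := rfl

theorem pvStep_corr (p : Int × Int) (hp : p ∈ pvKeys) (c : Char) :
    pvStepB (pvLbl p) c = pvLbl (pvStepA p c) ∧ pvStepA p c ∈ pvKeys := by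
  by_cases h1 : c = 'U'
  · subst h1; fin_cases hp <;> decide
  by_cases h2 : c = 'R'
  · subst h2; fin_cases hp <;> decide
  by_cases h3 : c = 'D'
  · subst h3; fin_cases hp <;> decide
  by_cases h4 : c = 'L'
  · subst h4; fin_cases hp <;> decide
  have n1 : ('U' == c) = false := by simp [Ne.symm h1]
  have n2 : ('R' == c) = false := by simp [Ne.symm h2]
  have n3 : ('D' == c) = false := by simp [Ne.symm h3]
  have n4 : ('L' == c) = false := by simp [Ne.symm h4]
  have hT : pvTrans = PySem.Dict.mk
      [("1", PySem.Dict.mk [('D', "3")]),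
       ("2", PySem.Dict.mk [('R', "3"), ('D', "6")]),
       ("3", PySem.Dict.mk [('U', "1"), ('L', "2"), ('R', "4"), ('D', "7")]),
       ("4", PySem.Dict.mk [('L', "3"), ('D', "8")]),
       ("5", PySem.Dict.mk [('R', "6")]),
       ("6", PySem.Dict.mk [('U', "2"), ('L', "5"), ('R', "7"), ('D', "A")]),
       ("7", PySem.Dict.mk [('U', "3"), ('L', "6"), ('R', "8"), ('D', "B")]),
       ("8", PySem.Dict.mk [('U', "4"), ('L', "7"), ('R', "9"), ('D', "C")]),
       ("9", PySem.Dict.mk [('L', "8")]),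
       ("A", PySem.Dict.mk [('U', "6"), ('R', "B")]),
       ("B", PySem.Dict.mk [('U', "7"), ('L', "A"), ('R', "C"), ('D', "D")]),
       ("C", PySem.Dict.mk [('U', "8"), ('L', "B")]),
       ("D", PySem.Dict.mk [('U', "B")])] := by rfl
  have hB : pvBtns = PySem.Dict.mk
      [((0, -2), "1"), ((-1, -1), "2"), ((0, -1), "3"), ((1, -1), "4"),
       ((-2, 0), "5"), ((-1, 0), "6"), ((0, 0), "7"), ((1, 0), "8"), ((2, 0), "9"),
       ((-1, 1), "A"), ((0, 1), "B"), ((1, 1), "C"), ((0, 2), "D")] := by rfl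
  constructor
  · have hA : pvStepA p c = p := by simp [pvStepA, h1, h2, h3, h4]
    rw [hA]
    fin_cases hp <;>
      simp [pvStepB, pvLbl, hT, hB, PySem.Dict.get?, PySem.Dict.getD, n1, n2, n3, n4]
  · simpa [pvStepA, h1, h2, h3, h4] using hp

theorem pvFold_corr (cs : List Char) (p : Int × Int) (hp : p ∈ pvKeys) :
    cs.foldl pvStepB (pvLbl p) = pvLbl (cs.foldl pvStepA p) ∧ cs.foldl pvStepA p ∈ pvKeys := by
  induction cs generalizing p with
  | nil => exact ⟨rfl, hp⟩
  | cons c cs ih =>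
      obtain ⟨he, hm⟩ := pvStep_corr p hp c
      simpa [List.foldl_cons, he] using ih (pvStepA p c) hm

-- shifting B's list accumulator out of the fold
theorem pvB_acc (inp : List String) (b : String) (acc : List String) :
    (inp.foldl
      (fun (st : String × List String) line =>
        (line.toList.foldl pvStepB st.1, st.2 ++ [line.toList.foldl pvStepB st.1]))
      (b, acc)).2 =
    acc ++ (inp.foldl
      (fun (st : String × List String) line =>
        (line.toList.foldl pvStepB st.1, st.2 ++ [line.toList.foldl pvStepB st.1]))
      (b, [])).2 := by
  induction inp generalizing b acc with
  | nil => simp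
  | cons line rest ih =>
      simp only [List.foldl_cons]
      rw [ih _ (acc ++ [_]), ih _ ([] ++ [_])]
      simp

-- String.join of a foldl-append with a seed
theorem pvJoin_seed (l : List String) (s : String) :
    List.foldl (fun r t => r ++ t) s l = s ++ List.foldl (fun r t => r ++ t) "" l := by
  induction l generalizing s with
  | nil => simp
  | cons a l ih =>
      simp only [List.foldl_cons]
      rw [ih (s ++ a), ih ("" ++ a)]
      simp [String.append_assoc]

theorem pvOuter_corr (inp : List String) (p : Int × Int) (hp : p ∈ pvKeys) (sa : String) :
    (pvFoldA inp (p, sa)).2 = sa ++ String.join (pvFoldB inp (pvLbl p, [])).2 := by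
  induction inp generalizing p sa with
  | nil => simp [pvFoldA, pvFoldB, String.join]
  | cons line rest ih =>
      obtain ⟨he, hm⟩ := pvFold_corr line.toList p hp
      simp only [pvFoldA, pvFoldB, List.foldl_cons] at *
      rw [ih (line.toList.foldl pvStepA p) hm, he]
      simp only [List.nil_append]
      rw [pvB_acc rest (pvLbl (List.foldl pvStepA p line.toList))
            [pvLbl (List.foldl pvStepA p line.toList)]]
      simp only [String.join, List.singleton_append, List.foldl_cons]
      rw [pvJoin_seed _ ("" ++ pvLbl (List.foldl pvStepA p line.toList))]
      simp [pvLbl, String.append_assoc]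

-- ===== VERDICT (by name: the statement is the Claim_ definition above) =====
theorem part2_spec : Claim_equal_part2 := by
  intro inp _
  unfold Spec_part2
  rw [part2_as_fold, part2_alt_as_fold]
  have h := pvOuter_corr inp (-2, 0) (by decide) ""
  simpa [pvLbl] using h
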